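-- pv_equiv track=rewrite | github.com/SS-hj/coding_test | programmers/12979.py | solution
-- ===== SOURCE A (Python) =====
-- import math
--
-- def solution(n, stations, w):
--     start = 0
--     cnt = 0
--     for i in range(len(stations)):
--         end = stations[i] - w - 2
--         if end >= start:
--             cnt += math.ceil((end-start+1)/(2*w+1))
--         start = stations[i] + w
--     end = n - 1
--     if n - 1 >= start:
--         cnt += math.ceil((end-start+1)/(2*w+1))
--     return cnt
-- ===== SOURCE B (Python) =====
-- def _fill(gap, d):
--     # Number of width-d spans needed to cover a stretch of `gap` positions,
--     # computed by greedy binary doubling (no division): repeatedly subtract the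
--     # largest power-of-two multiple of d that still fits.
--     cnt = 0
--     while gap > 0:
--         span, k = d, 1
--         while span * 2 <= gap:
--             span += span
--             k += k
--         gap -= span
--         cnt += k
--     return cnt
--
-- def solution(n, stations, w):
--     # Greedy coverage sweep: `covered` is the last covered position
--     # (1-indexed; 0 = nothing covered yet).
--     d = 2 * w + 1
--     covered = 0
--     cnt = 0
--     for s in stations:
--         cnt += _fill(s - w - 1 - covered, d)
--         covered = s + w
--     return cnt + _fill(n - covered, d)
-- ===== Notes on version B (the rewrite author's own statement) =====
-- stated objective: alternative
-- what changed: B replaces A's closed-form math.ceil gap arithmetic by a greedy coverage sweep with a covered-until cursor whose gap fill counts spans by binary doubling (repeatedly subtracting the largest power-of-two multiple of 2w+1 that fits), using no division at all.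
-- outside the precondition, e.g. on solution(5, [3], -1): A returns -6, B does not finish within the time limit
import Mathlib
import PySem

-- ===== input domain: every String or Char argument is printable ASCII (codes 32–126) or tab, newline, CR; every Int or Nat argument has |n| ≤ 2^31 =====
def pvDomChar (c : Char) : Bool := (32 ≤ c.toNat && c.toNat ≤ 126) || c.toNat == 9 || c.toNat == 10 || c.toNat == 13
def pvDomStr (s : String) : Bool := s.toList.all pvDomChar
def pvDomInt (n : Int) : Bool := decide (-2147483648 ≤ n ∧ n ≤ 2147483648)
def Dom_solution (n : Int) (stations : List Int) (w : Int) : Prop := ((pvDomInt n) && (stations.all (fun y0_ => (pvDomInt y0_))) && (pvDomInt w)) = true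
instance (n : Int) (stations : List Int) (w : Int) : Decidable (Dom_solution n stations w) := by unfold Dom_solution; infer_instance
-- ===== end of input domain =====

-- B replaces A's math.ceil gap arithmetic by a greedy coverage sweep whose gap fill counts
-- spans by binary doubling (no division anywhere) (objective: alternative).

-- Python's math.ceil(a/b): exact on Dom (|a| ≤ ~2^34 < 2^53, so the float division cannot
-- round across an integer); ceil(a/b) = -((-a) // b) with Python floor division.
def pyCeilDiv (a b : Int) : Int := -(PySem.Int.floordiv (-a) b)

-- ===== PORT A =====
def solution (n : Int) (stations : List Int) (w : Int) : Int :=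
  let p := stations.foldl (fun (st : Int × Int) s =>
      let e := s - w - 2
      let c := if e ≥ st.1 then st.2 + pyCeilDiv (e - st.1 + 1) (2 * w + 1) else st.2
      (s + w, c)) (0, 0)
  if n - 1 ≥ p.1 then p.2 + pyCeilDiv (n - 1 - p.1 + 1) (2 * w + 1) else p.2

-- ===== PORT B =====
-- B's inner doubling loop `while span * 2 <= gap: span += span; k += k`; the `1 ≤ span`
-- part of the guard only makes the recursion total (for span ≤ 0, i.e. w < 0 at the call
-- site, Python B does not terminate; Pre_solution excludes that).
def biggestSpan (gap span k : Int) : Int × Int :=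
  if h : 1 ≤ span ∧ span * 2 ≤ gap then biggestSpan gap (span + span) (k + k)
  else (span, k)
termination_by (gap - span).toNat
decreasing_by omega

-- B's outer fill loop `while gap > 0: … gap -= span; cnt += k`; the `1 ≤ d` and `1 ≤ p.1`
-- parts of the guards only make the recursion total (for d ≥ 1 the returned span is always
-- ≥ d ≥ 1, see biggestSpan_fst_ge below).
def fillGap (gap d cnt : Int) : Int :=
  if h : 0 < gap ∧ 1 ≤ d then
    let p := biggestSpan gap d 1
    if h2 : 1 ≤ p.1 then fillGap (gap - p.1) d (cnt + p.2) else cnt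
  else cnt
termination_by gap.toNat
decreasing_by simp only [p] at h2; omega

def solution_alt (n : Int) (stations : List Int) (w : Int) : Int :=
  let d := 2 * w + 1
  let p := stations.foldl (fun (st : Int × Int) s =>
      (s + w, st.2 + fillGap (s - w - 1 - st.1) d 0)) (0, 0)
  p.2 + fillGap (n - p.1) d 0

-- ===== PRECONDITION & SPEC =====
-- Pre_ restricts to the task's natural domain of a nonnegative coverage radius w: for
-- w < 0 A still returns (meaningless negative counts from ceil with a negative divisor)
-- while B's sweep does not terminate.
def Pre_solution (n : Int) (stations : List Int) (w : Int) : Prop := 0 ≤ w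
instance (n : Int) (stations : List Int) (w : Int) : Decidable (Pre_solution n stations w) := by unfold Pre_solution; infer_instance
def pvWitness_solution : Int × List Int × Int := (5, [2], 1)

def Spec_solution (n : Int) (stations : List Int) (w : Int) (out : Int) : Prop := out = solution_alt n stations w
instance (n : Int) (stations : List Int) (w : Int) (out : Int) : Decidable (Spec_solution n stations w out) := by unfold Spec_solution; infer_instance

-- ===== CLAIM (what is proved, stated in full; the proofs are below) =====
def Claim_equal_solution : Prop := ∀ (n : Int) (stations : List Int) (w : Int), Dom_solution n stations w → Pre_solution n stations w → Spec_solution n stations w (solution n stations w)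

-- ===== LEMMAS AND PROOFS =====

-- the doubling loop never shrinks the span
lemma biggestSpan_fst_ge : ∀ (f : Nat) (gap span k : Int), (gap - span).toNat ≤ f →
    span ≤ (biggestSpan gap span k).1 := by
  intro f
  induction f with
  | zero =>
    intro gap span k hf
    rw [biggestSpan]
    by_cases h : 1 ≤ span ∧ span * 2 ≤ gap
    · exact absurd hf (by omega)
    · rw [dif_neg h]
  | succ f ih =>
    intro gap span k hf
    rw [biggestSpan]
    by_cases h : 1 ≤ span ∧ span * 2 ≤ gap
    · rw [dif_pos h]
      have := ih gap (span + span) (k + k) (by omega)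
      omega
    · rw [dif_neg h]

-- The doubling loop returns a power-of-two multiple of d that fits in the gap (or the
-- untouched initial pair when even one span does not fit).
lemma biggestSpan_spec (d : Int) (hd : 1 ≤ d) : ∀ (f : Nat) (gap span k : Int),
    (gap - span).toNat ≤ f → 1 ≤ k → span = k * d →
    (biggestSpan gap span k).1 = (biggestSpan gap span k).2 * d ∧
    1 ≤ (biggestSpan gap span k).2 ∧
    ((biggestSpan gap span k).1 ≤ gap ∨ biggestSpan gap span k = (span, k)) := by
  intro f
  induction f with
  | zero =>
    intro gap span k hf hk hsk
    rw [biggestSpan]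
    by_cases h : 1 ≤ span ∧ span * 2 ≤ gap
    · exact absurd hf (by omega)
    · rw [dif_neg h]
      exact ⟨hsk, hk, Or.inr rfl⟩
  | succ f ih =>
    intro gap span k hf hk hsk
    rw [biggestSpan]
    by_cases h : 1 ≤ span ∧ span * 2 ≤ gap
    · rw [dif_pos h]
      have hrec := ih gap (span + span) (k + k) (by omega) (by omega) (by rw [hsk]; ring)
      refine ⟨hrec.1, hrec.2.1, ?_⟩
      rcases hrec.2.2 with hle | heq
      · exact Or.inl hle
      · exact Or.inl (by rw [heq]; omega)
    · rw [dif_neg h]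
      exact ⟨hsk, hk, Or.inr rfl⟩

-- The fill loop counts exactly the ceiling of the gap length over d.
lemma fillGap_eq (d : Int) (hd : 1 ≤ d) : ∀ (f : Nat) (gap cnt : Int), gap.toNat ≤ f →
    fillGap gap d cnt = cnt + (if 0 < gap then pyCeilDiv gap d else 0) := by
  intro f
  induction f with
  | zero =>
    intro gap cnt hf
    rw [fillGap.eq_def]
    have : ¬ 0 < gap := by omega
    simp [this]
  | succ f ih =>
    intro gap cnt hf
    rw [fillGap.eq_def]
    by_cases hg : 0 < gap
    · rw [dif_pos ⟨hg, hd⟩]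
      have hge0 : d ≤ (biggestSpan gap d 1).1 :=
        biggestSpan_fst_ge (gap - d).toNat gap d 1 le_rfl
      rw [dif_pos (show 1 ≤ (biggestSpan gap d 1).1 by omega)]
      set p := biggestSpan gap d 1 with hp
      have hspec := biggestSpan_spec d hd (gap - d).toNat gap d 1 le_rfl le_rfl (by ring)
      rw [← hp] at hspec
      obtain ⟨hmul, hk1, hfit⟩ := hspec
      have hge : d ≤ p.1 := by rw [hp]; exact hge0
      rw [ih (gap - p.1) (cnt + p.2) (by omega), if_pos hg]
      have hkey : (if 0 < gap - p.1 then pyCeilDiv (gap - p.1) d else 0) + p.2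
          = pyCeilDiv gap d := by
        by_cases hrem : 0 < gap - p.1
        · rw [if_pos hrem]
          set q := pyCeilDiv (gap - p.1) d with hq
          have hb := (PySem.Int.neg_floordiv_neg_eq_iff_of_pos
              (a := gap - p.1) (b := d) (q := q) (by omega)).mp rfl
          have : -(PySem.Int.floordiv (-gap) d) = q + p.2 := by
            refine (PySem.Int.neg_floordiv_neg_eq_iff_of_pos (by omega)).mpr ⟨?_, ?_⟩
            · nlinarith [hb.1, hb.2]
            · nlinarith [hb.1, hb.2]
          simp only [pyCeilDiv, this]
        · rw [if_neg hrem, zero_add]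
          have hk2 : p.2 = 1 ∨ p.1 ≤ gap := by
            rcases hfit with hle | heq
            · exact Or.inr hle
            · exact Or.inl (by rw [heq])
          have : -(PySem.Int.floordiv (-gap) d) = p.2 := by
            refine (PySem.Int.neg_floordiv_neg_eq_iff_of_pos (by omega)).mpr ⟨?_, ?_⟩
            · rcases hk2 with h1 | hle
              · rw [h1]; simpa using hg
              · nlinarith
            · nlinarith
          simp only [pyCeilDiv, this]
      omega
    · rw [dif_neg (by omega : ¬ (0 < gap ∧ 1 ≤ d)), if_neg hg]
      omega

lemma fillGap_eq' (d : Int) (hd : 1 ≤ d) (gap : Int) :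
    fillGap gap d 0 = if 0 < gap then pyCeilDiv gap d else 0 := by
  have := fillGap_eq d hd gap.toNat gap 0 le_rfl
  omega

-- Both folds keep identical (cursor, count) states.
lemma fold_eq (w : Int) (hw : 0 ≤ w) : ∀ (ss : List Int) (st : Int × Int),
    ss.foldl (fun (st : Int × Int) s =>
      let e := s - w - 2
      let c := if e ≥ st.1 then st.2 + pyCeilDiv (e - st.1 + 1) (2 * w + 1) else st.2
      (s + w, c)) st
    = ss.foldl (fun (st : Int × Int) s =>
      (s + w, st.2 + fillGap (s - w - 1 - st.1) (2 * w + 1) 0)) st := by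
  intro ss
  induction ss with
  | nil => intro st; rfl
  | cons s rest ih =>
    intro st
    simp only [List.foldl_cons]
    rw [← ih]
    congr 1
    rw [fillGap_eq' (2 * w + 1) (by omega)]
    by_cases h : s - w - 2 ≥ st.1
    · rw [if_pos h, if_pos (show 0 < s - w - 1 - st.1 by omega)]
      congr 2
      ring_nf
    · rw [if_neg h, if_neg (show ¬ 0 < s - w - 1 - st.1 by omega), add_zero]

-- ===== VERDICT (by name: the statement is the Claim_ definition above) =====
theorem solution_spec : Claim_equal_solution := by
  intro n stations w _ hw
  have hw' : (0:Int) ≤ w := hw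
  show solution n stations w = solution_alt n stations w
  unfold solution solution_alt
  rw [fold_eq w hw']
  simp only []
  set p := stations.foldl (fun (st : Int × Int) s =>
      (s + w, st.2 + fillGap (s - w - 1 - st.1) (2 * w + 1) 0)) (0, 0) with hp
  rw [fillGap_eq' (2 * w + 1) (by omega)]
  by_cases h : n - 1 ≥ p.1
  · rw [if_pos h, if_pos (show 0 < n - p.1 by omega)]
    congr 2
    ring_nf
  · rw [if_neg h, if_neg (show ¬ 0 < n - p.1 by omega), add_zero]
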